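-- pv_equiv track=rewrite | github.com/guoronghua/python3_practice | aa/algorithm_collection.py | b_first_search
-- ===== SOURCE A (Python) =====
-- def b_first_search(a_list, target):
--     """查找第一个等于目标值"""
--     low = 0
--     high = len(a_list) - 1
--     while low <= high:
--         mid = low + (high - low) // 2
--         if target < a_list[mid]:
--             high = mid - 1
--         elif target > a_list[mid]:
--             low = mid + 1
--         else:
--             if mid == 0 or a_list[mid - 1] != target:
--                 return mid
--             high = mid - 1
--     return -1
-- ===== SOURCE B (Python) =====
-- def b_first_search(a_list, target):
--     """查找第一个等于目标值 (lower-bound formulation)"""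
--     low, high = 0, len(a_list)
--     while low < high:
--         mid = (low + high) // 2
--         if a_list[mid] < target:
--             low = mid + 1
--         else:
--             high = mid
--     if low < len(a_list) and a_list[low] == target:
--         return low
--     return -1
-- ===== Notes on version B (the rewrite author's own statement) =====
-- stated objective: idiomatic
-- what changed: Replaced A's three-way binary search with early return and a mid-1 neighbor check by a classic lower_bound loop (half-open interval, single two-way comparison, no early return) followed by one bounds+equality check.
-- outside the precondition, e.g. on b_first_search([3, 1, 2], 1): A returns 1, B returns -1
import Mathlib
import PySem

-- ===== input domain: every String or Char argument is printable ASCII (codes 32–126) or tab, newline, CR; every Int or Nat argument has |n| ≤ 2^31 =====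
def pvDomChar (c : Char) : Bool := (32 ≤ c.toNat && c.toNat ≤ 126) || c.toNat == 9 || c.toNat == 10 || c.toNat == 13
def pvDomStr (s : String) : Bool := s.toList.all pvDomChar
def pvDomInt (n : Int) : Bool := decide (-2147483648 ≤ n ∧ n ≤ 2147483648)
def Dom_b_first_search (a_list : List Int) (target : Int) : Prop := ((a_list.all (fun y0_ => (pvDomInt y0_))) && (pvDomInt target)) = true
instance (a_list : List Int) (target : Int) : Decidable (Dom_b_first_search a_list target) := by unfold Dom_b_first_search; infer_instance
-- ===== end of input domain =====

-- B replaces A's three-way binary search (early return, mid-1 neighbor check) by a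
-- classic lower_bound loop plus one final bounds+equality check; same O(log n) cost.

-- ===== PORT A =====
-- the while-loop of A; a_list[mid] / a_list[mid-1] are always in range when Python
-- evaluates them (0 ≤ low ≤ mid ≤ high ≤ len-1, and mid-1 only when mid ≠ 0), so
-- pyGetD is exact there
def bfsLoopA (a_list : List Int) (target low high : Int) : Int :=
  if _h : low ≤ high then
    let mid := low + PySem.Int.floordiv (high - low) 2
    let v := PySem.List.pyGetD a_list mid 0
    if target < v then bfsLoopA a_list target low (mid - 1)
    else if v < target then bfsLoopA a_list target (mid + 1) high
    else if mid = 0 ∨ PySem.List.pyGetD a_list (mid - 1) 0 ≠ target then mid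
    else bfsLoopA a_list target low (mid - 1)
  else -1
termination_by (high + 1 - low).toNat
decreasing_by
  all_goals
    rw [PySem.Int.floordiv_eq_ediv_of_pos (by norm_num)] at *
    omega

def b_first_search (a_list : List Int) (target : Int) : Int :=
  bfsLoopA a_list target 0 ((a_list.length : Int) - 1)

-- ===== PORT B =====
-- lower_bound loop of Source B; a_list[mid] is in range when evaluated (0 ≤ low ≤ mid < high ≤ len)
def lbLoop (a_list : List Int) (target low high : Int) : Int :=
  if _h : low < high then
    let mid := PySem.Int.floordiv (low + high) 2
    if PySem.List.pyGetD a_list mid 0 < target then lbLoop a_list target (mid + 1) high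
    else lbLoop a_list target low mid
  else low
termination_by (high - low).toNat
decreasing_by
  all_goals
    rw [PySem.Int.floordiv_eq_ediv_of_pos (by norm_num)] at *
    omega

def b_first_search_alt (a_list : List Int) (target : Int) : Int :=
  let low := lbLoop a_list target 0 (a_list.length : Int)
  if low < (a_list.length : Int) ∧ PySem.List.pyGetD a_list low 0 = target then low else -1

-- ===== PRECONDITION & SPEC =====
-- Pre_ excludes only unsorted lists that contain the target: A is a binary search, so on
-- unsorted input containing the target the value it returns (e.g. 1 on ([3,1,2], 1)) is an
-- accident of its probe order, not a specified result; when the target is absent both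
-- programs return -1 on any list, so those inputs stay inside Pre_.
def Pre_b_first_search (a_list : List Int) (target : Int) : Prop :=
  a_list.Pairwise (· ≤ ·) ∨ target ∉ a_list
instance (a_list : List Int) (target : Int) : Decidable (Pre_b_first_search a_list target) := by unfold Pre_b_first_search; infer_instance

def pvWitness_b_first_search : List Int × Int := ([1, 2, 2, 3], 2)

def Spec_b_first_search (a_list : List Int) (target : Int) (out : Int) : Prop := out = b_first_search_alt a_list target
instance (a_list : List Int) (target : Int) (out : Int) : Decidable (Spec_b_first_search a_list target out) := by unfold Spec_b_first_search; infer_instance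

-- ===== CLAIM (what is proved, stated in full; the proofs are below) =====
def Claim_equal_b_first_search : Prop := ∀ (a_list : List Int) (target : Int), Dom_b_first_search a_list target → Pre_b_first_search a_list target → Spec_b_first_search a_list target (b_first_search a_list target)

-- ===== LEMMAS AND PROOFS =====

-- number of elements strictly below target: the lower-bound index
def cntLt (a : List Int) (t : Int) : Nat := a.countP (fun x => decide (x < t))

lemma cntLt_le (a : List Int) (t : Int) : cntLt a t ≤ a.length :=
  List.countP_le_length

-- in a sorted list, the elements < t are exactly the first (cntLt a t) elements
lemma cntLt_lt_iff (a : List Int) (t : Int) (h : a.Pairwise (· ≤ ·)) :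
    ∀ (i : Nat), (hi : i < a.length) → (a[i] < t ↔ i < cntLt a t) := by
  induction a with
  | nil => intro i hi; simp at hi
  | cons x xs ih =>
    have hx : ∀ y ∈ xs, x ≤ y := fun y hy => List.rel_of_pairwise_cons h hy
    have hxs := List.Pairwise.of_cons h
    intro i hi
    cases i with
    | zero =>
      simp only [List.getElem_cons_zero, cntLt, List.countP_cons]
      constructor
      · intro hlt; simp [hlt]
      · intro hpos
        by_contra hnot
        push_neg at hnot
        have h0 : (decide (x < t)) = false := by simp; omega
        rw [h0] at hpos
        simp only [Bool.false_eq_true, if_false, Nat.add_zero] at hpos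
        obtain ⟨y, hy, hyt⟩ := List.countP_pos_iff.mp hpos
        have := hx y hy
        simp at hyt
        omega
    | succ j =>
      have hj : j < xs.length := by simpa using hi
      have := ih hxs j hj
      simp only [List.getElem_cons_succ]
      rw [this]
      simp only [cntLt, List.countP_cons]
      by_cases hxt : x < t
      · simp [hxt]
      · have hz : xs.countP (fun y => decide (y < t)) = 0 := by
          rw [List.countP_eq_zero]
          intro y hy
          have := hx y hy
          simp; omega
        constructor
        · intro hjc; omega
        · intro hc
          exfalso
          simp [hz, hxt] at hc

lemma sorted_mono (a : List Int) (h : a.Pairwise (· ≤ ·)) (i j : Nat)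
    (hij : i ≤ j) (hj : j < a.length) : a[i]'(by omega) ≤ a[j] := by
  rcases Nat.lt_or_eq_of_le hij with hlt | heq
  · exact List.pairwise_iff_getElem.mp h i j (by omega) hj hlt
  · subst heq; exact le_refl _

-- if t occurs in sorted a, it occurs first at index cntLt a t
lemma mem_first (a : List Int) (t : Int) (h : a.Pairwise (· ≤ ·)) (hm : t ∈ a) :
    ∃ hc : cntLt a t < a.length, a[cntLt a t] = t := by
  obtain ⟨j, hj, hje⟩ := List.mem_iff_getElem.mp hm
  have hjc : ¬ (j < cntLt a t) := by
    intro hlt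
    have := (cntLt_lt_iff a t h j hj).mpr hlt
    omega
  have hc : cntLt a t < a.length := by omega
  refine ⟨hc, ?_⟩
  have h1 : a[cntLt a t] ≤ a[j] := sorted_mono a h _ j (by omega) hj
  have h2 : ¬ (a[cntLt a t] < t) := by
    intro hlt
    have := (cntLt_lt_iff a t h _ hc).mp hlt
    omega
  omega

-- B's loop computes the lower-bound index
lemma lbLoop_eq (a : List Int) (t : Int) (h : a.Pairwise (· ≤ ·)) :
    ∀ (low high : Int), 0 ≤ low → low ≤ (cntLt a t : Int) → (cntLt a t : Int) ≤ high →
      high ≤ (a.length : Int) → lbLoop a t low high = (cntLt a t : Int) := by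
  intro low high
  induction low, high using lbLoop.induct a t with
  | case1 low high hlt mid hv ih =>
    intro h0 hlc hch hhn
    have hmid : low ≤ mid ∧ mid < high := by
      simp only [mid, PySem.Int.floordiv_eq_ediv_of_pos (by norm_num : (0:Int) < 2)]
      omega
    have hmn : mid.toNat < a.length := by omega
    have hget : PySem.List.pyGetD a mid (0:Int) = a[mid.toNat] :=
      PySem.List.pyGetD_eq_getElem a (0:Int) (by omega) (by omega)
    rw [lbLoop, dif_pos hlt]
    show (if PySem.List.pyGetD a mid 0 < t then lbLoop a t (mid + 1) high
          else lbLoop a t low mid) = _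
    rw [if_pos hv]
    rw [hget] at hv
    have := (cntLt_lt_iff a t h mid.toNat hmn).mp hv
    apply ih <;> omega
  | case2 low high hlt mid hv ih =>
    intro h0 hlc hch hhn
    have hmid : low ≤ mid ∧ mid < high := by
      simp only [mid, PySem.Int.floordiv_eq_ediv_of_pos (by norm_num : (0:Int) < 2)]
      omega
    have hmn : mid.toNat < a.length := by omega
    have hget : PySem.List.pyGetD a mid (0:Int) = a[mid.toNat] :=
      PySem.List.pyGetD_eq_getElem a (0:Int) (by omega) (by omega)
    rw [lbLoop, dif_pos hlt]
    show (if PySem.List.pyGetD a mid 0 < t then lbLoop a t (mid + 1) high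
          else lbLoop a t low mid) = _
    rw [if_neg hv]
    rw [hget] at hv
    have hcm : (cntLt a t : Int) ≤ mid := by
      by_contra hc
      push_neg at hc
      exact hv ((cntLt_lt_iff a t h mid.toNat hmn).mpr (by omega))
    apply ih <;> omega
  | case3 low high hlt =>
    intro h0 hlc hch hhn
    rw [lbLoop, dif_neg hlt]
    omega

-- A's loop returns the first occurrence (or -1) under the invariant
lemma bfsLoopA_eq (a : List Int) (t : Int) (h : a.Pairwise (· ≤ ·)) :
    ∀ (low high : Int), 0 ≤ low → high < (a.length : Int) →
      (t ∈ a → low ≤ (cntLt a t : Int) ∧ (cntLt a t : Int) ≤ high) →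
      bfsLoopA a t low high = (if t ∈ a then (cntLt a t : Int) else -1) := by
  intro low high
  induction low, high using bfsLoopA.induct a t with
  | case1 low high hle mid v hv ih =>
    -- t < v : go left
    intro h0 hhn hinv
    have hmid : low ≤ mid ∧ mid ≤ high := by
      simp only [mid, PySem.Int.floordiv_eq_ediv_of_pos (by norm_num : (0:Int) < 2)]
      omega
    have hmn : mid.toNat < a.length := by omega
    have hget : v = a[mid.toNat] := by
      show PySem.List.pyGetD a mid (0:Int) = a[mid.toNat]
      exact PySem.List.pyGetD_eq_getElem a (0:Int) (by omega) (by omega)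
    rw [bfsLoopA, dif_pos hle]
    show (if t < v then bfsLoopA a t low (mid - 1)
          else if v < t then bfsLoopA a t (mid + 1) high
          else if mid = 0 ∨ PySem.List.pyGetD a (mid - 1) 0 ≠ t then mid
          else bfsLoopA a t low (mid - 1)) = _
    rw [if_pos hv]
    rw [hget] at hv
    apply ih (by omega) (by omega)
    intro hm
    obtain ⟨hlc, hch⟩ := hinv hm
    have hcm : (cntLt a t : Int) ≤ mid := by
      by_contra hc
      push_neg at hc
      have : a[mid.toNat] < t := (cntLt_lt_iff a t h mid.toNat hmn).mpr (by omega)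
      omega
    obtain ⟨hcl, hce⟩ := mem_first a t h hm
    refine ⟨by omega, ?_⟩
    rcases eq_or_lt_of_le hcm with heq | hlt'
    · exfalso
      have hidx : cntLt a t = mid.toNat := by omega
      have hmt : a[mid.toNat] = t := by
        rw [getElem_congr_idx hidx.symm]
        exact hce
      omega
    · omega
  | case2 low high hle mid v hv1 hv2 ih =>
    -- v < t : go right
    intro h0 hhn hinv
    have hmid : low ≤ mid ∧ mid ≤ high := by
      simp only [mid, PySem.Int.floordiv_eq_ediv_of_pos (by norm_num : (0:Int) < 2)]
      omega
    have hmn : mid.toNat < a.length := by omega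
    have hget : v = a[mid.toNat] := by
      show PySem.List.pyGetD a mid (0:Int) = a[mid.toNat]
      exact PySem.List.pyGetD_eq_getElem a (0:Int) (by omega) (by omega)
    rw [bfsLoopA, dif_pos hle]
    show (if t < v then bfsLoopA a t low (mid - 1)
          else if v < t then bfsLoopA a t (mid + 1) high
          else if mid = 0 ∨ PySem.List.pyGetD a (mid - 1) 0 ≠ t then mid
          else bfsLoopA a t low (mid - 1)) = _
    rw [if_neg hv1, if_pos hv2]
    rw [hget] at hv2
    apply ih (by omega) hhn
    intro hm
    obtain ⟨hlc, hch⟩ := hinv hm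
    have : mid.toNat < cntLt a t := (cntLt_lt_iff a t h mid.toNat hmn).mp hv2
    omega
  | case3 low high hle mid v hv1 hv2 hfirst =>
    -- v = t and (mid = 0 or a[mid-1] ≠ t): return mid (= first occurrence)
    intro h0 hhn hinv
    have hmid : low ≤ mid ∧ mid ≤ high := by
      simp only [mid, PySem.Int.floordiv_eq_ediv_of_pos (by norm_num : (0:Int) < 2)]
      omega
    have hmn : mid.toNat < a.length := by omega
    have hget : v = a[mid.toNat] := by
      show PySem.List.pyGetD a mid (0:Int) = a[mid.toNat]
      exact PySem.List.pyGetD_eq_getElem a (0:Int) (by omega) (by omega)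
    have hvt : v = t := by omega
    have hm : t ∈ a := by
      rw [← hvt, hget]; exact List.getElem_mem hmn
    obtain ⟨hlc, hch⟩ := hinv hm
    have hcm : (cntLt a t : Int) ≤ mid := by
      by_contra hc
      push_neg at hc
      have : a[mid.toNat] < t := (cntLt_lt_iff a t h mid.toNat hmn).mpr (by omega)
      omega
    rw [bfsLoopA, dif_pos hle]
    show (if t < v then bfsLoopA a t low (mid - 1)
          else if v < t then bfsLoopA a t (mid + 1) high
          else if mid = 0 ∨ PySem.List.pyGetD a (mid - 1) 0 ≠ t then mid
          else bfsLoopA a t low (mid - 1)) = _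
    rw [if_neg hv1, if_neg hv2, if_pos hfirst, if_pos hm]
    rcases hfirst with hz | hne
    · omega
    · by_cases hz : mid = 0
      · omega
      · have hm1 : (mid - 1).toNat < a.length := by omega
        have hget1 : PySem.List.pyGetD a (mid - 1) (0:Int) = a[(mid - 1).toNat] :=
          PySem.List.pyGetD_eq_getElem a (0:Int) (by omega) (by omega)
        rw [hget1] at hne
        have hle1 : a[(mid-1).toNat] ≤ a[mid.toNat] :=
          sorted_mono a h _ _ (by omega) hmn
        have hlt1 : a[(mid-1).toNat] < t := by omega
        have := (cntLt_lt_iff a t h (mid-1).toNat hm1).mp hlt1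
        omega
  | case4 low high hle mid v hv1 hv2 hfirst ih =>
    -- v = t, mid ≠ 0, a[mid-1] = t : go left
    intro h0 hhn hinv
    have hmid : low ≤ mid ∧ mid ≤ high := by
      simp only [mid, PySem.Int.floordiv_eq_ediv_of_pos (by norm_num : (0:Int) < 2)]
      omega
    have hmn : mid.toNat < a.length := by omega
    have hget : v = a[mid.toNat] := by
      show PySem.List.pyGetD a mid (0:Int) = a[mid.toNat]
      exact PySem.List.pyGetD_eq_getElem a (0:Int) (by omega) (by omega)
    push_neg at hfirst
    obtain ⟨hz, heq1⟩ := hfirst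
    have hm1 : (mid - 1).toNat < a.length := by omega
    have hget1 : PySem.List.pyGetD a (mid - 1) (0:Int) = a[(mid - 1).toNat] :=
      PySem.List.pyGetD_eq_getElem a (0:Int) (by omega) (by omega)
    rw [bfsLoopA, dif_pos hle]
    show (if t < v then bfsLoopA a t low (mid - 1)
          else if v < t then bfsLoopA a t (mid + 1) high
          else if mid = 0 ∨ PySem.List.pyGetD a (mid - 1) 0 ≠ t then mid
          else bfsLoopA a t low (mid - 1)) = _
    rw [if_neg hv1, if_neg hv2, if_neg (by push_neg; exact ⟨hz, heq1⟩)]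
    apply ih (by omega) (by omega)
    intro hm
    obtain ⟨hlc, hch⟩ := hinv hm
    rw [hget1] at heq1
    have hnotlt : ¬ ((mid - 1).toNat < cntLt a t) := by
      intro hc
      have := (cntLt_lt_iff a t h (mid-1).toNat hm1).mpr hc
      omega
    exact ⟨by omega, by omega⟩
  | case5 low high hle =>
    intro h0 hhn hinv
    rw [bfsLoopA, dif_neg hle]
    split
    · next hm =>
      exfalso
      obtain ⟨hlc, hch⟩ := hinv hm
      omega
    · rfl

-- B's loop result is never negative when started at a nonnegative low
lemma lbLoop_nonneg (a : List Int) (t : Int) :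
    ∀ (low high : Int), 0 ≤ low → 0 ≤ lbLoop a t low high := by
  intro low high
  induction low, high using lbLoop.induct a t with
  | case1 low high hlt mid hv ih =>
    intro h0
    have hmid : low ≤ mid := by
      simp only [mid, PySem.Int.floordiv_eq_ediv_of_pos (by norm_num : (0:Int) < 2)]
      omega
    rw [lbLoop, dif_pos hlt]
    show 0 ≤ (if PySem.List.pyGetD a mid 0 < t then lbLoop a t (mid + 1) high
              else lbLoop a t low mid)
    rw [if_pos hv]
    exact ih (by omega)
  | case2 low high hlt mid hv ih =>
    intro h0
    rw [lbLoop, dif_pos hlt]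
    show 0 ≤ (if PySem.List.pyGetD a mid 0 < t then lbLoop a t (mid + 1) high
              else lbLoop a t low mid)
    rw [if_neg hv]
    exact ih h0
  | case3 low high hlt =>
    intro h0
    rw [lbLoop, dif_neg hlt]
    exact h0

-- when the target is absent, A's loop returns -1 on any list (sorted or not)
lemma bfsLoopA_notmem (a : List Int) (t : Int) (hnm : t ∉ a) :
    ∀ (low high : Int), 0 ≤ low → high < (a.length : Int) →
      bfsLoopA a t low high = -1 := by
  intro low high
  induction low, high using bfsLoopA.induct a t with
  | case1 low high hle mid v hv ih =>
    intro h0 hhn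
    have hmid : low ≤ mid ∧ mid ≤ high := by
      simp only [mid, PySem.Int.floordiv_eq_ediv_of_pos (by norm_num : (0:Int) < 2)]
      omega
    rw [bfsLoopA, dif_pos hle]
    show (if t < v then bfsLoopA a t low (mid - 1)
          else if v < t then bfsLoopA a t (mid + 1) high
          else if mid = 0 ∨ PySem.List.pyGetD a (mid - 1) 0 ≠ t then mid
          else bfsLoopA a t low (mid - 1)) = _
    rw [if_pos hv]
    exact ih h0 (by omega)
  | case2 low high hle mid v hv1 hv2 ih =>
    intro h0 hhn
    have hmid : low ≤ mid ∧ mid ≤ high := by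
      simp only [mid, PySem.Int.floordiv_eq_ediv_of_pos (by norm_num : (0:Int) < 2)]
      omega
    rw [bfsLoopA, dif_pos hle]
    show (if t < v then bfsLoopA a t low (mid - 1)
          else if v < t then bfsLoopA a t (mid + 1) high
          else if mid = 0 ∨ PySem.List.pyGetD a (mid - 1) 0 ≠ t then mid
          else bfsLoopA a t low (mid - 1)) = _
    rw [if_neg hv1, if_pos hv2]
    exact ih (by omega) hhn
  | case3 low high hle mid v hv1 hv2 hfirst =>
    intro h0 hhn
    exfalso
    have hmid : low ≤ mid ∧ mid ≤ high := by
      simp only [mid, PySem.Int.floordiv_eq_ediv_of_pos (by norm_num : (0:Int) < 2)]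
      omega
    have hmn : mid.toNat < a.length := by omega
    have hget : v = a[mid.toNat] := by
      show PySem.List.pyGetD a mid (0:Int) = a[mid.toNat]
      exact PySem.List.pyGetD_eq_getElem a (0:Int) (by omega) (by omega)
    have hvt : v = t := by omega
    exact hnm (by rw [← hvt, hget]; exact List.getElem_mem hmn)
  | case4 low high hle mid v hv1 hv2 hfirst ih =>
    intro h0 hhn
    have hmid : low ≤ mid ∧ mid ≤ high := by
      simp only [mid, PySem.Int.floordiv_eq_ediv_of_pos (by norm_num : (0:Int) < 2)]
      omega
    rw [bfsLoopA, dif_pos hle]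
    show (if t < v then bfsLoopA a t low (mid - 1)
          else if v < t then bfsLoopA a t (mid + 1) high
          else if mid = 0 ∨ PySem.List.pyGetD a (mid - 1) 0 ≠ t then mid
          else bfsLoopA a t low (mid - 1)) = _
    rw [if_neg hv1, if_neg hv2, if_neg hfirst]
    exact ih h0 (by omega)
  | case5 low high hle =>
    intro h0 hhn
    rw [bfsLoopA, dif_neg hle]

-- ===== VERDICT (by name: the statement is the Claim_ definition above) =====
theorem b_first_search_spec : Claim_equal_b_first_search := by
  intro a t _ hpre
  unfold Spec_b_first_search b_first_search b_first_search_alt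
  rcases hpre with hsorted | hnot
  case inr =>
    -- target absent: both sides return -1
    rw [bfsLoopA_notmem a t hnot 0 _ (by omega) (by omega)]
    have h0 : 0 ≤ lbLoop a t 0 (a.length : Int) := lbLoop_nonneg a t 0 _ (by omega)
    simp only
    rw [if_neg]
    rintro ⟨hlt, heq⟩
    apply hnot
    rw [PySem.List.pyGetD_eq_getElem a (0:Int) h0 hlt] at heq
    rw [← heq]
    exact List.getElem_mem _
  case inl =>
  by_cases hm : t ∈ a
  · obtain ⟨hc, hce⟩ := mem_first a t hsorted hm
    have hA : bfsLoopA a t 0 ((a.length : Int) - 1) = (cntLt a t : Int) := by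
      rw [bfsLoopA_eq a t hsorted 0 _ (by omega) (by omega)
        (fun _ => ⟨by omega, by omega⟩)]
      simp [hm]
    have hB : lbLoop a t 0 (a.length : Int) = (cntLt a t : Int) :=
      lbLoop_eq a t hsorted 0 _ (by omega) (by omega) (by omega) (by omega)
    rw [hA, hB]
    simp only
    rw [if_pos]
    refine ⟨by omega, ?_⟩
    rw [PySem.List.pyGetD_eq_getElem a (0:Int) (by omega) (by omega)]
    have : ((cntLt a t : Int)).toNat = cntLt a t := by omega
    rw [getElem_congr_idx this]
    exact hce
  · have hA : bfsLoopA a t 0 ((a.length : Int) - 1) = -1 := by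
      rw [bfsLoopA_eq a t hsorted 0 _ (by omega) (by omega) (fun hm' => absurd hm' hm)]
      simp [hm]
    have hB : lbLoop a t 0 (a.length : Int) = (cntLt a t : Int) :=
      lbLoop_eq a t hsorted 0 _ (by omega)
        (by omega) (by have := cntLt_le a t; omega) (by omega)
    rw [hA, hB]
    simp only
    rw [if_neg]
    rintro ⟨hlt, heq⟩
    have hcn : cntLt a t < a.length := by omega
    rw [PySem.List.pyGetD_eq_getElem a (0:Int) (by omega) (by omega)] at heq
    apply hm
    rw [← heq]
    exact List.getElem_mem _
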